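-- pv_equiv track=rewrite | github.com/KNU-HAEDAL/2024-SS-small-group-ALSol | SWKIM/11to20/19.py | solution
-- ===== SOURCE A (Python) =====
-- def solution(string_list, query_list):
--     key_list = set(string_list)
--     answer = []
--
--     # string_list와 query_list의 값이 중복되지 않도록 set 사용
--     for i in query_list:
--         key_list.add(i)
--
--     hashtable = dict()
--
--     # key_list에 저장된 값에서 string_list에 포함됐다면 1, 아니면 0
--     for i in key_list:
--         hashtable[i] = 0
--
--     for i in string_list:
--         hashtable[i] = 1
--
--     # query_list의 값이 string_list에 포함됐다면 True, 아니면 False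
--     for i in query_list:
--         if hashtable[i] == 1:
--             answer.append(True)
--         else:
--             answer.append(False)
--
--     return answer
-- ===== SOURCE B (Python) =====
-- def solution(string_list, query_list):
--     # Sort the distinct strings once; answer each query by binary search.
--     arr = sorted(set(string_list))
--
--     def contains(q):
--         lo, hi = 0, len(arr)
--         while lo < hi:
--             mid = (lo + hi) // 2
--             if arr[mid] < q:
--                 lo = mid + 1
--             else:
--                 hi = mid
--         return lo < len(arr) and arr[lo] == q
--
--     return [contains(q) for q in query_list]
-- ===== Notes on version B (the rewrite author's own statement) =====
-- stated objective: alternative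
-- what changed: Replaces A's union set and 0/1 flag hashtable with a sorted deduplicated array and a hand-written binary search per query (comparison-based ordered search instead of hashing).
import Mathlib
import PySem

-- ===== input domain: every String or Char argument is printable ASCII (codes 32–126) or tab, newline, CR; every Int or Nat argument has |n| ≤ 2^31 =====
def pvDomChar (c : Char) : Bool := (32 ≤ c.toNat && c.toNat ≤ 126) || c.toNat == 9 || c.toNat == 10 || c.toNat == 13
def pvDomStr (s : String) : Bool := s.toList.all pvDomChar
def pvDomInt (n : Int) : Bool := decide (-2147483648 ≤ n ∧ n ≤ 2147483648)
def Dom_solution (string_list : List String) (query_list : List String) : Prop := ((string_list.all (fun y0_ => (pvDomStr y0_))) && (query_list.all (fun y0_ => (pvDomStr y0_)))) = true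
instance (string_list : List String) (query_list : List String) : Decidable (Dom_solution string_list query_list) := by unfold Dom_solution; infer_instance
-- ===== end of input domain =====

-- B replaces A's union set and 0/1-flag hashtable with a sorted deduplicated array queried
-- by a hand-written binary search (objective: alternative — ordered search instead of hashing).

-- ===== PORT A =====
def solution (string_list : List String) (query_list : List String) : List Bool :=
  let key_list0 : PySem.Set String := PySem.Set.ofList string_list
  -- for i in query_list: key_list.add(i)
  let key_list : PySem.Set String := query_list.foldl PySem.Set.add key_list0
  -- for i in key_list: hashtable[i] = 0   (dict only looked up afterwards, order-independent)
  let h0 : PySem.Dict String Int := key_list.foldl (fun d k => d.insert k 0) PySem.Dict.empty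
  -- for i in string_list: hashtable[i] = 1
  let h1 : PySem.Dict String Int := string_list.foldl (fun d k => d.insert k 1) h0
  -- for i in query_list: append True/False; hashtable[i] always present, so getD is exact
  query_list.foldl (fun ans q => ans ++ [if h1.getD q 0 == 1 then true else false]) []

-- ===== PORT B =====
-- the 'while lo < hi' loop of Source B's contains(); lo, hi are always ≥ 0, so Nat carries them;
-- arr[mid] is exact via getD since 0 ≤ lo ≤ mid < hi ≤ len(arr) throughout
def bsLoop (arr : List String) (q : String) (lo hi : Nat) : Nat :=
  if lo < hi then
    let mid := (lo + hi) / 2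
    if arr.getD mid "" < q then bsLoop arr q (mid + 1) hi else bsLoop arr q lo mid
  else lo
termination_by hi - lo
decreasing_by all_goals omega

-- Source B's contains(q): binary search then final check 'lo < len(arr) and arr[lo] == q'
def bsContains (arr : List String) (q : String) : Bool :=
  let lo := bsLoop arr q 0 arr.length
  decide (lo < arr.length) && decide (arr.getD lo "" = q)

def solution_alt (string_list : List String) (query_list : List String) : List Bool :=
  -- arr = sorted(set(string_list))
  let arr : List String := PySem.List.sorted (PySem.Set.ofList string_list) (fun x => x) false
  query_list.map (fun q => bsContains arr q)

-- ===== PRECONDITION & SPEC =====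
def Spec_solution (string_list : List String) (query_list : List String) (out : List Bool) : Prop := out = solution_alt string_list query_list
instance (string_list : List String) (query_list : List String) (out : List Bool) : Decidable (Spec_solution string_list query_list out) := by unfold Spec_solution; infer_instance

-- ===== CLAIM (what is proved, stated in full; the proofs are below) =====
def Claim_equal_solution : Prop := ∀ (string_list : List String) (query_list : List String), Dom_solution string_list query_list → Spec_solution string_list query_list (solution string_list query_list)

-- ===== LEMMAS AND PROOFS =====

-- append-accumulator loop = map
theorem pv_foldl_append_map {α β : Type} (f : α → β) (l : List α) (acc : List β) :
    l.foldl (fun ans q => ans ++ [f q]) acc = acc ++ l.map f := by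
  induction l generalizing acc with
  | nil => simp
  | cons x xs ih => simp [List.foldl, ih]

-- A's all-zeros pass
theorem pv_getD_zero (l : List String) (q : String) :
    (l.foldl (fun d k => d.insert k (0 : Int)) PySem.Dict.empty).getD q 0 = 0 := by
  suffices h : ∀ d : PySem.Dict String Int, d.getD q 0 = 0 →
      (l.foldl (fun d k => d.insert k (0 : Int)) d).getD q 0 = 0 by
    exact h _ (by simp [PySem.Dict.getD_empty])
  induction l with
  | nil => intro d hd; simpa using hd
  | cons x xs ih =>
    intro d hd
    refine ih _ ?_
    rw [PySem.Dict.getD_insert]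
    split_ifs <;> simp [hd]

-- A's ones pass
theorem pv_getD_one (l : List String) (d : PySem.Dict String Int) (q : String) :
    (l.foldl (fun d k => d.insert k (1 : Int)) d).getD q 0
      = if q ∈ l then 1 else d.getD q 0 := by
  induction l generalizing d with
  | nil => simp
  | cons x xs ih =>
    simp only [List.foldl, ih, PySem.Dict.getD_insert, List.mem_cons]
    by_cases hx : q = x <;> by_cases hm : q ∈ xs <;> simp [hx, hm]

-- binary-search loop invariant: everything left of the result is < q, nothing from the result on is < q
theorem bsLoop_inv (arr : List String) (q : String)
    (hsort : ∀ i j, i ≤ j → j < arr.length → arr.getD i "" ≤ arr.getD j "")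
    (lo hi : Nat) :
    hi ≤ arr.length → lo ≤ hi →
    (∀ i, i < lo → arr.getD i "" < q) →
    (∀ i, hi ≤ i → i < arr.length → ¬ arr.getD i "" < q) →
    bsLoop arr q lo hi ≤ arr.length ∧
      (∀ i, i < bsLoop arr q lo hi → arr.getD i "" < q) ∧
      (∀ i, bsLoop arr q lo hi ≤ i → i < arr.length → ¬ arr.getD i "" < q) := by
  fun_induction bsLoop arr q lo hi with
  | case1 lo hi h mid hcond ih =>
    intro hhi hlh hL hR
    refine ih hhi (by omega) ?_ hR
    intro i hi'
    have hmlen : mid < arr.length := by omega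
    exact lt_of_le_of_lt (hsort i mid (by omega) hmlen) hcond
  | case2 lo hi h mid hcond ih =>
    intro hhi hlh hL hR
    refine ih (by omega) (by omega) hL ?_
    intro i hi' hlen habs
    exact hcond (lt_of_le_of_lt (hsort mid i hi' hlen) habs)
  | case3 lo hi h =>
    intro hhi hlh hL hR
    have : lo = hi := by omega
    subst this
    exact ⟨hhi, hL, hR⟩

-- on a ≤-sorted array, bsContains decides membership
theorem bsContains_mem (arr : List String) (q : String)
    (hsort : ∀ i j, i ≤ j → j < arr.length → arr.getD i "" ≤ arr.getD j "") :
    bsContains arr q = true ↔ q ∈ arr := by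
  obtain ⟨hlen, hL, hR⟩ := bsLoop_inv arr q hsort 0 arr.length le_rfl (Nat.zero_le _)
    (fun i hi => absurd hi (Nat.not_lt_zero i)) (fun i hi hlen => by omega)
  set r := bsLoop arr q 0 arr.length with hr
  constructor
  · intro hb
    unfold bsContains at hb
    rw [← hr] at hb
    simp only [Bool.and_eq_true, decide_eq_true_eq] at hb
    obtain ⟨h1, h2⟩ := hb
    rw [List.getD_eq_getElem?_getD, List.getElem?_eq_getElem h1] at h2
    simp only [Option.getD_some] at h2
    rw [← h2]
    exact List.getElem_mem h1
  · intro hq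
    obtain ⟨j, hj, hje⟩ := List.mem_iff_getElem.mp hq
    have hgj : arr.getD j "" = q := by
      rw [List.getD_eq_getElem?_getD, List.getElem?_eq_getElem hj]
      simpa using hje
    have hjr : r ≤ j := by
      by_contra hlt
      exact absurd (hL j (by omega)) (by rw [hgj]; exact lt_irrefl q)
    have hrlen : r < arr.length := by omega
    have h1 : ¬ arr.getD r "" < q := hR r le_rfl hrlen
    have h2 : arr.getD r "" ≤ q := by
      have := hsort r j hjr hj
      rwa [hgj] at this
    have h3 : arr.getD r "" = q := le_antisymm h2 (not_lt.mp h1)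
    unfold bsContains
    rw [← hr]
    rw [List.getD_eq_getElem?_getD, List.getElem?_eq_getElem hrlen] at h3
    simp only [Option.getD_some] at h3
    simp [hrlen, h3]

-- the sorted dedup array is ≤-sorted in the getD sense
theorem pv_sorted_getD_mono (sl : List String) :
    ∀ i j, i ≤ j →
      j < (PySem.List.sorted (PySem.Set.ofList sl) (fun x => x) false).length →
      (PySem.List.sorted (PySem.Set.ofList sl) (fun x => x) false).getD i "" ≤
      (PySem.List.sorted (PySem.Set.ofList sl) (fun x => x) false).getD j "" := by
  have hpw : (PySem.List.sorted (PySem.Set.ofList sl) (fun x => x) false).Pairwise (· < ·) :=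
    PySem.List.sorted_ofList_pairwise_lt sl
  intro i j hij hj
  rcases Nat.lt_or_ge i j with h | h
  · have hlt := (List.pairwise_iff_getElem.mp hpw) i j (by omega) hj h
    rw [List.getD_eq_getElem?_getD, List.getD_eq_getElem?_getD,
      List.getElem?_eq_getElem (by omega : i < _), List.getElem?_eq_getElem hj]
    exact le_of_lt (by simpa using hlt)
  · have : i = j := by omega
    subst this; exact le_rfl

theorem solution_spec : Claim_equal_solution := by
  intro string_list query_list _
  show _ = _
  unfold solution solution_alt
  rw [pv_foldl_append_map]
  simp only [List.nil_append]
  apply List.map_congr_left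
  intro q _
  rw [pv_getD_one, pv_getD_zero]
  have hmem : bsContains (PySem.List.sorted (PySem.Set.ofList string_list) (fun x => x) false) q
      = true ↔ q ∈ string_list := by
    rw [bsContains_mem _ _ (pv_sorted_getD_mono string_list), PySem.List.mem_sorted,
      PySem.Set.mem_ofList]
  by_cases h : q ∈ string_list
  · simp [h, hmem.mpr h]
  · have hf : bsContains (PySem.List.sorted (PySem.Set.ofList string_list) (fun x => x) false) q
        = false := by
      rw [Bool.eq_false_iff]
      intro hb
      exact h (hmem.mp hb)
    simp [h, hf]
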